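-- pv_equiv track=rewrite | github.com/Portglass/ADNComparator | ADN_library.py | complementaire
-- ===== SOURCE A (Python) =====
-- def complementaire(seq):  # Give the complementary sequence as a string
--     seq_comp = []
--     for i in seq:
--         if i == 'A':
--             seq_comp.append("T")
--         elif i == 'T':
--             seq_comp.append("A")
--         elif i == 'C':
--             seq_comp.append("G")
--         elif i == 'G':
--             seq_comp.append("C")
--         else:
--             return -1
--     return seq_comp
-- ===== SOURCE B (Python) =====
-- TABLE = str.maketrans("ATCG", "TAGC")
--
-- def complementaire(seq):  # idiomatic: set-difference validation, then str.translate
--     if set(seq) - set("ATCG"):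
--         return -1
--     return list(seq.translate(TABLE))
-- ===== Notes on version B (the rewrite author's own statement) =====
-- stated objective: idiomatic
-- what changed: A walks the string with an if/elif chain, appending one complement per iteration and early-returning -1; B has no explicit per-character loop: it validates via a set difference against the four valid bases and produces the complement with str.maketrans/str.translate, then list().
-- outside the precondition, e.g. on complementaire('AX'): A returns -1, B returns -1
import Mathlib
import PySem

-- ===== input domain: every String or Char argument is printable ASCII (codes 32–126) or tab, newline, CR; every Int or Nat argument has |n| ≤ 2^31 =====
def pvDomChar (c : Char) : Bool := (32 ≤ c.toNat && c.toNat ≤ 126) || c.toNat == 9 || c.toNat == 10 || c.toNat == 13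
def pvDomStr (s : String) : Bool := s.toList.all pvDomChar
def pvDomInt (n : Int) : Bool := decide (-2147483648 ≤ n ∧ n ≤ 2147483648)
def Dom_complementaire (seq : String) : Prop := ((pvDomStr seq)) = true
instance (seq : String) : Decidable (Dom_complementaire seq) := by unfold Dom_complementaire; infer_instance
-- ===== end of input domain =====

-- B replaces A's explicit per-character loop with set-difference validation plus
-- str.maketrans/str.translate (idiomatic); same values wherever both return a list.

-- ===== PORT A =====
-- A's loop: append the complement of each base, early `return -1` on any other character.
-- `-1` is not a value of type List String, so those inputs are excluded by Pre_ below and the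
-- port returns [] there (nothing is claimed outside Pre_).
def complementaireLoop : List Char → List String
  | [] => []
  | c :: rest =>
    if c = 'A' then "T" :: complementaireLoop rest
    else if c = 'T' then "A" :: complementaireLoop rest
    else if c = 'C' then "G" :: complementaireLoop rest
    else if c = 'G' then "C" :: complementaireLoop rest
    else []  -- Python: return -1 (excluded by Pre_)

def complementaire (seq : String) : List String :=
  complementaireLoop seq.toList

-- ===== PORT B =====
-- str.maketrans("ATCG","TAGC"): a character-to-character table
def pvTable : PySem.Dict Char Char :=
  PySem.Dict.ofList [('A', 'T'), ('T', 'A'), ('C', 'G'), ('G', 'C')]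

-- seq.translate(TABLE): each char replaced by its table image, unmapped chars unchanged
-- (exact for these ASCII inputs); list(str) = the string's characters as 1-char strings.
def complementaire_alt (seq : String) : List String :=
  if PySem.Set.diff (PySem.Set.ofList seq.toList) ("ATCG".toList) ≠ [] then
    []  -- Python: return -1 (excluded by Pre_)
  else
    (seq.toList.map (fun c => (PySem.Dict.get? pvTable c).getD c)).map (fun c => String.ofList [c])

-- ===== PRECONDITION & SPEC =====
-- Pre_ excludes inputs containing a character other than A/T/C/G: there Python A (and B)
-- return the int -1, which is not a value of the declared type List String.
def Pre_complementaire (seq : String) : Prop :=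
  (seq.toList.all (fun c => c == 'A' || c == 'T' || c == 'C' || c == 'G')) = true
instance (seq : String) : Decidable (Pre_complementaire seq) := by
  unfold Pre_complementaire; infer_instance

def pvWitness_complementaire : String := "GATTACA"

def Spec_complementaire (seq : String) (out : List String) : Prop := out = complementaire_alt seq
instance (seq : String) (out : List String) : Decidable (Spec_complementaire seq out) := by
  unfold Spec_complementaire; infer_instance

-- ===== CLAIM (what is proved, stated in full; the proofs are below) =====
def Claim_equal_complementaire : Prop :=
  ∀ (seq : String), Dom_complementaire seq → Pre_complementaire seq →
    Spec_complementaire seq (complementaire seq)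

-- ===== LEMMAS AND PROOFS =====
theorem diff_nil_of_valid (l : List Char)
    (h : ∀ c ∈ l, c = 'A' ∨ c = 'T' ∨ c = 'C' ∨ c = 'G') :
    PySem.Set.diff (PySem.Set.ofList l) ("ATCG".toList) = [] := by
  rw [List.eq_nil_iff_forall_not_mem]
  intro c hc
  have hmem : c ∈ PySem.Set.diff (PySem.Set.ofList l) ("ATCG".toList) := hc
  have h1 : c ∈ PySem.Set.ofList l ∧ c ∉ ("ATCG".toList) := by
    simpa [PySem.Set.diff, List.mem_filter] using hmem
  have h2 : c ∈ l := by
    have := h1.1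
    simpa [PySem.Set.mem_ofList] using this
  rcases h c h2 with h3 | h3 | h3 | h3 <;> subst h3 <;> exact h1.2 (by decide)

theorem loop_eq_translate (l : List Char)
    (h : ∀ c ∈ l, c = 'A' ∨ c = 'T' ∨ c = 'C' ∨ c = 'G') :
    complementaireLoop l =
      (l.map (fun c => (PySem.Dict.get? pvTable c).getD c)).map (fun c => String.ofList [c]) := by
  induction l with
  | nil => rfl
  | cons c rest ih =>
    have hc := h c (List.mem_cons_self ..)
    have hr := ih (fun x hx => h x (List.mem_cons_of_mem _ hx))
    rcases hc with h1 | h1 | h1 | h1 <;> subst h1 <;>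
      simp [complementaireLoop, hr] <;> decide

-- ===== VERDICT (by name: the statement is the Claim_ definition above) =====
theorem complementaire_spec : Claim_equal_complementaire := by
  intro seq _ hpre
  unfold Pre_complementaire at hpre
  have h : ∀ c ∈ seq.toList, c = 'A' ∨ c = 'T' ∨ c = 'C' ∨ c = 'G' := by
    intro c hc
    have := (List.all_eq_true.mp hpre) c hc
    simp only [Bool.or_eq_true, beq_iff_eq] at this
    tauto
  unfold Spec_complementaire complementaire complementaire_alt
  rw [if_neg (by simp only [ne_eq, not_not]; exact diff_nil_of_valid seq.toList h)]
  exact loop_eq_translate seq.toList h
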